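-- pv_equiv track=rewrite | github.com/kdtix-open/skill-plan-to-project | scripts/sbr/investigations.py | _extract_summary_line
-- ===== SOURCE A (Python) =====
-- def _extract_summary_line(finding: str) -> str | None:
--     """Pull the `SUMMARY:` line out of the sub-agent's markdown finding.
--
--     System prompts instruct the sub-agent to end with a one-sentence
--     `SUMMARY:` line suitable for voice narration.  If that line is
--     present, return it (without the SUMMARY: prefix).  Otherwise
--     fall back to the first paragraph.
--     """
--     for line in finding.splitlines():
--         stripped = line.strip()
--         if stripped.upper().startswith("SUMMARY:"):
--             return stripped.split(":", 1)[1].strip() or None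
--     # Fallback — first non-blank line, capped at 200 chars.
--     for line in finding.splitlines():
--         if line.strip():
--             return line.strip()[:200]
--     return None
-- ===== SOURCE B (Python) =====
-- def _extract_summary_line(finding: str) -> str | None:
--     """One pass over the lines: return the SUMMARY payload as soon as it is
--     seen, otherwise remember the first non-blank stripped line (capped at
--     200 chars) in an accumulator and return it after the loop."""
--     fallback = None
--     for line in finding.splitlines():
--         s = line.strip()
--         if s[:8].upper() == "SUMMARY:":
--             return s[8:].strip() or None
--         if fallback is None and s:
--             fallback = s[:200]
--     return fallback
-- ===== Notes on version B (the rewrite author's own statement) =====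
-- stated objective: simpler
-- what changed: A's two sequential scans over the lines (one for the SUMMARY line, then a restart for the first non-blank fallback) are merged into a single pass that keeps the first non-blank stripped line in an accumulator, and the split-based payload extraction is replaced by slicing the stripped line at index 8, valid because a case-insensitive SUMMARY prefix puts the first colon at index 7.
import Mathlib
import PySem

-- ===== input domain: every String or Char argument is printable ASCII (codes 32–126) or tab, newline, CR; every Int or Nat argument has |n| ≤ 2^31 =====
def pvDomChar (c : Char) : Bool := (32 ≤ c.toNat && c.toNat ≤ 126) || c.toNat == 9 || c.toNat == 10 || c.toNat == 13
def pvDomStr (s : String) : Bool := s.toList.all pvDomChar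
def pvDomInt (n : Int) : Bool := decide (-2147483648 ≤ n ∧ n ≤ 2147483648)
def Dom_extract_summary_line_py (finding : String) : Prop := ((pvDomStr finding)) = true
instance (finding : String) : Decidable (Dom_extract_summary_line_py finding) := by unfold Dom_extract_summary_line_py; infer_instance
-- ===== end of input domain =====

-- B merges A's two sequential scans of the lines into a single pass keeping the
-- first non-blank line in an accumulator, and replaces split(":",1) by direct
-- slicing at index 8 (objective: simpler).

-- ===== PORT A =====
-- first loop: some r = the loop early-returned with value r, none = it fell through
def pyALoop1 : List String → Option (Option String)
  | [] => none
  | line :: rest =>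
    let stripped := PySem.Str.strip line
    if PySem.Str.startswith (PySem.Str.upper stripped) "SUMMARY:" then
      some (match PySem.Str.splitMax? stripped ":" 1 with
        | some parts =>
          match PySem.List.pyGet? parts 1 with
          | some p => if PySem.Str.strip p = "" then none else some (PySem.Str.strip p)
          | none => none   -- unreachable: startswith "SUMMARY:" guarantees a ':' so split yields 2 parts
        | none => none)    -- unreachable: the separator ":" is nonempty
    else pyALoop1 rest

-- fallback loop: first non-blank line, capped at 200 chars
def pyALoop2 : List String → Option String
  | [] => none
  | line :: rest =>
    if PySem.Str.strip line ≠ "" then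
      some (PySem.Str.slice (PySem.Str.strip line) none (some 200))
    else pyALoop2 rest

def extract_summary_line_py (finding : String) : Option String :=
  match pyALoop1 (PySem.Str.splitlines finding) with
  | some r => r
  | none => pyALoop2 (PySem.Str.splitlines finding)

-- ===== PORT B =====
def pyBLoop : List String → Option String → Option String
  | [], fb => fb
  | line :: rest, fb =>
    let s := PySem.Str.strip line
    if PySem.Str.upper (PySem.Str.slice s none (some 8)) == "SUMMARY:" then
      if PySem.Str.strip (PySem.Str.slice s (some 8) none) = "" then none
      else some (PySem.Str.strip (PySem.Str.slice s (some 8) none))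
    else
      pyBLoop rest (if fb = none ∧ s ≠ "" then some (PySem.Str.slice s none (some 200)) else fb)

def extract_summary_line_py_alt (finding : String) : Option String :=
  pyBLoop (PySem.Str.splitlines finding) none

-- ===== PRECONDITION & SPEC =====
def Spec_extract_summary_line_py (finding : String) (out : Option String) : Prop := out = extract_summary_line_py_alt finding
instance (finding : String) (out : Option String) : Decidable (Spec_extract_summary_line_py finding out) := by unfold Spec_extract_summary_line_py; infer_instance

-- ===== CLAIM (what is proved, stated in full; the proofs are below) =====
def Claim_equal_extract_summary_line_py : Prop := ∀ (finding : String), Dom_extract_summary_line_py finding → Spec_extract_summary_line_py finding (extract_summary_line_py finding)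

-- ===== LEMMAS AND PROOFS =====

-- with maxsplit exhausted, go returns the remainder as the final piece, any fuel
lemma go_m0 (fuel : Nat) (l : List Char) (acc : List (List Char)) :
    PySem.Chars.splitOnMax.go [':'] fuel 0 l [] acc = (l :: acc).reverse := by
  cases fuel <;> cases l <;> simp [PySem.Chars.splitOnMax.go]

-- scanning over a colon-free prefix only moves it into the current piece
lemma go_skip (pre : List Char) (h : ':' ∉ pre) :
    ∀ (fuel : Nat) (l cur : List Char) (acc : List (List Char)),
    PySem.Chars.splitOnMax.go [':'] (fuel + pre.length + 1) 1 (pre ++ l) cur acc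
      = PySem.Chars.splitOnMax.go [':'] (fuel + 1) 1 l (pre.reverse ++ cur) acc := by
  induction pre with
  | nil => intro fuel l cur acc; simp
  | cons c pre ih =>
    intro fuel l cur acc
    have hc : c ≠ ':' := fun hcc => h (by simp [hcc])
    have h' : ':' ∉ pre := fun hm => h (List.mem_cons_of_mem _ hm)
    have step : PySem.Chars.splitOnMax.go [':'] (fuel + (c :: pre).length + 1) 1 ((c :: pre) ++ l) cur acc
        = PySem.Chars.splitOnMax.go [':'] (fuel + pre.length + 1) 1 (pre ++ l) (c :: cur) acc := by
      have : fuel + (c :: pre).length + 1 = (fuel + pre.length + 1) + 1 := by simp; omega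
      rw [this]
      simp [PySem.Chars.splitOnMax.go, List.isPrefixOf]
      intro hh
      exact absurd hh.symm hc
    rw [step, ih h']
    simp

-- str.split(":", 1) on a string whose first colon is after `pre`
lemma split_colon (pre rest : List Char) (h : ':' ∉ pre) :
    PySem.Chars.splitOnMax (pre ++ ':' :: rest) [':'] 1 = [pre, rest] := by
  unfold PySem.Chars.splitOnMax
  rw [if_neg (by omega)]
  have hlen : (pre ++ ':' :: rest).length + 1 = (rest.length + 1) + pre.length + 1 := by simp; omega
  have ht : (1:Int).toNat = 1 := rfl
  rw [ht, hlen, go_skip pre h]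
  simp [PySem.Chars.splitOnMax.go, List.isPrefixOf, go_m0]

lemma upperChar_colon {c : Char} (h : PySem.Chars.upperChar c = ':') : c = ':' := by
  unfold PySem.Chars.upperChar at h
  split at h
  · exfalso
    rename_i hl
    simp [PySem.Chars.islower, Char.le_def, UInt32.le_iff_toNat_le] at hl
    have hv : (Char.ofNat (c.toNat - 32)).toNat = (':' : Char).toNat := by rw [h]
    have hval : (c.toNat - 32).isValidChar := by
      left; change c.toNat - 32 < 55296
      omega
    rw [Char.toNat_ofNat, if_pos hval] at hv
    have hc : c.toNat = c.val.toNat := rfl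
    have h58 : (':' : Char).toNat = 58 := rfl
    omega
  · exact h

-- a stripped line passing A's SUMMARY test is 7 colon-free chars, a colon, a tail
lemma decomp (s : String)
    (h : PySem.Str.startswith (PySem.Str.upper s) "SUMMARY:" = true) :
    ∃ pre rest, s.toList = pre ++ ':' :: rest ∧ pre.length = 7 ∧ ':' ∉ pre := by
  rw [PySem.Str.startswith_eq, PySem.Str.toList_upper] at h
  rw [PySem.Chars.startswith_iff] at h
  obtain ⟨t, ht⟩ := h
  rcases hs : s.toList with _ | ⟨c0, _ | ⟨c1, _ | ⟨c2, _ | ⟨c3, _ | ⟨c4, _ | ⟨c5, _ | ⟨c6, _ | ⟨c7, rest⟩⟩⟩⟩⟩⟩⟩⟩ <;>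
    rw [hs] at ht <;> simp [PySem.Chars.upper, List.map] at ht
  obtain ⟨h0, h1, h2, h3, h4, h5, h6, h7, _⟩ := ht
  refine ⟨[c0, c1, c2, c3, c4, c5, c6], rest, ?_, rfl, ?_⟩
  · rw [upperChar_colon h7.symm]; rfl
  · intro hm
    simp [List.mem_cons] at hm
    rcases hm with rfl | rfl | rfl | rfl | rfl | rfl | rfl <;>
      first
      | exact absurd h0.symm (by decide)
      | exact absurd h1.symm (by decide)
      | exact absurd h2.symm (by decide)
      | exact absurd h3.symm (by decide)
      | exact absurd h4.symm (by decide)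
      | exact absurd h5.symm (by decide)
      | exact absurd h6.symm (by decide)

lemma ofList_eq_iff (l : List Char) (r : String) : (String.ofList l = r) ↔ l = r.toList := by
  constructor
  · intro h; rw [← h, String.toList_ofList]
  · intro h; rw [h, String.ofList_toList]

-- A's SUMMARY test and B's agree on every stripped line
lemma cond_iff (s : String) :
    PySem.Str.startswith (PySem.Str.upper s) "SUMMARY:"
      = (PySem.Str.upper (PySem.Str.slice s none (some 8)) == "SUMMARY:") := by
  rw [Bool.eq_iff_iff]
  rw [PySem.Str.startswith_eq, PySem.Str.toList_upper, PySem.Chars.startswith_iff]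
  rw [beq_iff_eq]
  unfold PySem.Str.upper
  rw [ofList_eq_iff]
  rw [PySem.Str.toList_slice, PySem.Chars.slice_eq_listSlice]
  rw [PySem.List.slice_to s.toList (b := 8) (by norm_num)]
  show _ ↔ PySem.Chars.upper (List.take (8:Int).toNat s.toList) = _
  have h8 : (8:Int).toNat = 8 := rfl
  rw [h8]
  unfold PySem.Chars.upper
  rw [List.map_take]
  rw [List.prefix_iff_eq_take]
  exact ⟨Eq.symm, Eq.symm⟩

-- when the test holds, A's split(":",1)[1] payload is B's s[8:] payload
lemma value_eq (s : String)
    (h : PySem.Str.startswith (PySem.Str.upper s) "SUMMARY:" = true) :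
    (match PySem.Str.splitMax? s ":" 1 with
      | some parts =>
        match PySem.List.pyGet? parts 1 with
        | some p => if PySem.Str.strip p = "" then none else some (PySem.Str.strip p)
        | none => none
      | none => (none : Option String))
    = (if PySem.Str.strip (PySem.Str.slice s (some 8) none) = "" then none
       else some (PySem.Str.strip (PySem.Str.slice s (some 8) none))) := by
  obtain ⟨pre, rest, hcs, hlen, hpre⟩ := decomp s h
  have hsplit : PySem.Str.splitMax? s ":" 1 = some [String.ofList pre, String.ofList rest] := by
    unfold PySem.Str.splitMax? PySem.Chars.splitMax?
    rw [if_neg (by decide)]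
    show some (List.map _ (PySem.Chars.splitOnMax s.toList (":".toList) 1)) = _
    rw [show (":".toList) = [':'] from rfl, hcs, split_colon pre rest hpre]
    rfl
  have hget : PySem.List.pyGet? [String.ofList pre, String.ofList rest] (1:Int)
      = some (String.ofList rest) := by rfl
  rw [hsplit]
  show (match PySem.List.pyGet? [String.ofList pre, String.ofList rest] (1:Int) with
        | some p => if PySem.Str.strip p = "" then none else some (PySem.Str.strip p)
        | none => (none : Option String)) = _
  rw [hget]
  show (if PySem.Str.strip (String.ofList rest) = "" then none else some (PySem.Str.strip (String.ofList rest))) = _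
  have hrest : (PySem.Str.slice s (some 8) none).toList = rest := by
    rw [PySem.Str.toList_slice, PySem.Chars.slice_eq_listSlice]
    rw [PySem.List.slice_from s.toList (a := 8) (by norm_num)]
    rw [hcs, show pre ++ ':' :: rest = (pre ++ [':']) ++ rest by simp]
    have h8 : (8:Int).toNat = (pre ++ [':']).length := by simp [hlen]
    rw [h8, List.drop_left]
  have hslice : PySem.Str.strip (PySem.Str.slice s (some 8) none) = PySem.Str.strip (String.ofList rest) := by
    unfold PySem.Str.strip
    rw [hrest, String.toList_ofList]
  rw [hslice]

-- B's one pass simulates A's two loops, for any accumulator state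
lemma loop_eq : ∀ (lines : List String) (fb : Option String),
    pyBLoop lines fb = (match pyALoop1 lines with
      | some r => r
      | none => match fb with | some v => some v | none => pyALoop2 lines) := by
  intro lines
  induction lines with
  | nil => intro fb; cases fb <;> rfl
  | cons line rest ih =>
    intro fb
    by_cases hc : PySem.Str.startswith (PySem.Str.upper (PySem.Str.strip line)) "SUMMARY:" = true
    · have hcb : (PySem.Str.upper (PySem.Str.slice (PySem.Str.strip line) none (some 8)) == "SUMMARY:") = true := by
        rw [← cond_iff]; exact hc
      rw [pyBLoop, pyALoop1]
      simp only [hc, hcb, if_true]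
      exact (value_eq _ hc).symm
    · have hcb : (PySem.Str.upper (PySem.Str.slice (PySem.Str.strip line) none (some 8)) == "SUMMARY:") = false := by
        rw [← cond_iff]; exact Bool.of_not_eq_true hc
      rw [pyBLoop, pyALoop1, pyALoop2]
      simp only [hc, hcb, if_false, Bool.false_eq_true]
      rw [ih]
      rcases fb with _ | v
      · by_cases hb : PySem.Str.strip line = ""
        · simp [hb]
        · simp [hb]
      · simp

-- ===== VERDICT (by name: the statement is the Claim_ definition above) =====
theorem extract_summary_line_py_spec : Claim_equal_extract_summary_line_py := by
  intro finding _
  unfold Spec_extract_summary_line_py extract_summary_line_py extract_summary_line_py_alt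
  rw [loop_eq]
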